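-- pv_equiv track=rewrite | github.com/thierryxdp/TCC | problems/835/solution_347495.py | melhor_volta
-- ===== SOURCE A (Python) =====
-- def melhor_volta(matriz:list) -> tuple:
--     ''''''
--     menor_valor = 0
--     todos_tempos = []
--     for i in range(len(matriz)):
--         for j in range(len(matriz[0])):
--             todos_tempos.append(matriz[i][j])
--     for i in range(len(matriz)):
--         for j in range(len(matriz[0])):
--             if min(todos_tempos) == matriz[i][j]:
--                 return (i+1, matriz[i][j], j+1)
-- ===== SOURCE B (Python) =====
-- def melhor_volta(matriz: list) -> tuple:
--     if not matriz:
--         return None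
--     best = None
--     for i in range(len(matriz)):
--         for j in range(len(matriz[0])):
--             v = matriz[i][j]
--             if best is None or v < best[1]:
--                 best = (i + 1, v, j + 1)
--     return best
-- ===== Notes on version B (the rewrite author's own statement) =====
-- stated objective: faster
-- what changed: B does one pass tracking a best-so-far (i+1, value, j+1) tuple with strict '<' instead of flattening the matrix into a list and rescanning it with min() recomputed for every cell of a second double loop.
-- outside the precondition, e.g. on melhor_volta([]): A returns None, B returns None; on melhor_volta([[]]): A returns None, B returns None; on melhor_volta([[1, 2], [3]]): A raises IndexError, B raises IndexError
import Mathlib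
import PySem

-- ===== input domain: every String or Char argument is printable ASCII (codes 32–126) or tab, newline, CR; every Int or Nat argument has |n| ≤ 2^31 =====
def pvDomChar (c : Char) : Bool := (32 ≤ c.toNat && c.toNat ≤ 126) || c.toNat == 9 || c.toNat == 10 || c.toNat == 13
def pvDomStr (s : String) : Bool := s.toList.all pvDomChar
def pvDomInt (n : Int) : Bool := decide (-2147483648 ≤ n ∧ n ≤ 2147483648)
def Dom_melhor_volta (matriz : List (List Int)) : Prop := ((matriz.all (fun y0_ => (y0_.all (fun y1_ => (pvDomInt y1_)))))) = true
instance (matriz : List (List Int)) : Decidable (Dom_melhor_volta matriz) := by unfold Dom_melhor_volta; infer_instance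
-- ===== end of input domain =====

-- B replaces A's build-flat-list-then-rescan-with-min() algorithm by a single pass that
-- tracks a best-so-far (row+1, value, col+1) triple (simpler decomposition, same values).

-- ===== PORT A =====
def melhor_volta (matriz : List (List Int)) : List Int :=
  let todos : List Int :=
    (PySem.List.pyRange 0 (matriz.length : Int) 1).foldl (fun acc i =>
      (PySem.List.pyRange 0 ((PySem.List.pyGetD matriz 0 []).length : Int) 1).foldl (fun acc j =>
        acc ++ [PySem.List.pyGetD (PySem.List.pyGetD matriz i []) j 0]) acc) []
  let res : Option (List Int) :=
    (PySem.List.pyRange 0 (matriz.length : Int) 1).foldl (fun acc i =>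
      (PySem.List.pyRange 0 ((PySem.List.pyGetD matriz 0 []).length : Int) 1).foldl (fun acc j =>
        match acc with
        | some r => some r
        | none =>
          if PySem.List.min? todos (fun y => y) =
              some (PySem.List.pyGetD (PySem.List.pyGetD matriz i []) j 0) then
            some [i + 1, PySem.List.pyGetD (PySem.List.pyGetD matriz i []) j 0, j + 1]
          else none) acc) none
  res.getD []

-- ===== PORT B =====
def melhor_volta_alt (matriz : List (List Int)) : List Int :=
  if matriz = [] then []
  else
    let best : Option (Int × Int × Int) :=
      (PySem.List.pyRange 0 (matriz.length : Int) 1).foldl (fun best i =>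
        (PySem.List.pyRange 0 ((PySem.List.pyGetD matriz 0 []).length : Int) 1).foldl (fun best j =>
          let v := PySem.List.pyGetD (PySem.List.pyGetD matriz i []) j 0
          match best with
          | none => some (i + 1, v, j + 1)
          | some b => if v < b.2.1 then some (i + 1, v, j + 1) else some b) best) none
    match best with
    | some b => [b.1, b.2.1, b.2.2]
    | none => []

-- ===== PRECONDITION & SPEC =====
-- Pre_ excludes exactly the inputs on which Python A does not return a tuple: the empty
-- matrix and matrices with an empty first row (A falls through and returns None, not a
-- tuple), and matrices with some row shorter than the first row (IndexError).
def Pre_melhor_volta (matriz : List (List Int)) : Prop :=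
  matriz ≠ [] ∧ matriz.headI ≠ [] ∧ ∀ row ∈ matriz, matriz.headI.length ≤ row.length
instance (matriz : List (List Int)) : Decidable (Pre_melhor_volta matriz) := by
  unfold Pre_melhor_volta; infer_instance
def pvWitness_melhor_volta : List (List Int) := [[3, 1], [2, 1]]

def Spec_melhor_volta (matriz : List (List Int)) (out : List Int) : Prop := out = melhor_volta_alt matriz
instance (matriz : List (List Int)) (out : List Int) : Decidable (Spec_melhor_volta matriz out) := by unfold Spec_melhor_volta; infer_instance

-- ===== CLAIM (what is proved, stated in full; the proofs are below) =====
def Claim_equal_melhor_volta : Prop := ∀ (matriz : List (List Int)), Dom_melhor_volta matriz → Pre_melhor_volta matriz → Spec_melhor_volta matriz (melhor_volta matriz)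

-- ===== LEMMAS AND PROOFS =====

-- The cell (i+1, matriz[i][j], j+1), and all cells in scan order (first row's width).
def pvCell (matriz : List (List Int)) (i j : Int) : Int × Int × Int :=
  (i + 1, PySem.List.pyGetD (PySem.List.pyGetD matriz i []) j 0, j + 1)

def pvCells (matriz : List (List Int)) : List (Int × Int × Int) :=
  (PySem.List.pyRange 0 (matriz.length : Int) 1).flatMap (fun i =>
    (PySem.List.pyRange 0 ((PySem.List.pyGetD matriz 0 []).length : Int) 1).map (pvCell matriz i))

-- A's early-return step and B's best-so-far step, expressed on cells.
def pvStepA (m : Option Int) (acc : Option (List Int)) (c : Int × Int × Int) : Option (List Int) :=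
  match acc with
  | some r => some r
  | none => if m = some c.2.1 then some [c.1, c.2.1, c.2.2] else none

def pvStepB (best : Option (Int × Int × Int)) (c : Int × Int × Int) : Option (Int × Int × Int) :=
  match best with
  | none => some c
  | some b => if c.2.1 < b.2.1 then some c else some b

theorem pvFoldl_flatMap {α β γ : Type} (l : List α) (g : α → List β) (f : γ → β → γ) (init : γ) :
    (l.flatMap g).foldl f init = l.foldl (fun acc x => (g x).foldl f acc) init := by
  induction l generalizing init with
  | nil => rfl
  | cons a t ih => simp [List.flatMap_cons, List.foldl_append, ih]

-- the nested range-loops of both ports are a single fold over pvCells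
theorem pvNested (matriz : List (List Int)) {γ : Type} (f : γ → (Int × Int × Int) → γ) (init : γ) :
    (PySem.List.pyRange 0 (matriz.length : Int) 1).foldl (fun acc i =>
      (PySem.List.pyRange 0 ((PySem.List.pyGetD matriz 0 []).length : Int) 1).foldl
        (fun acc j => f acc (pvCell matriz i j)) acc) init
    = (pvCells matriz).foldl f init := by
  rw [pvCells, pvFoldl_flatMap]
  simp [List.foldl_map]

theorem pvStepA_some (m : Option Int) (l : List (Int × Int × Int)) (r : List Int) :
    l.foldl (pvStepA m) (some r) = some r := by
  induction l with
  | nil => rfl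
  | cons c t ih => simpa [pvStepA] using ih

theorem pvFoldA_eq_find (m : Option Int) (l : List (Int × Int × Int)) :
    l.foldl (pvStepA m) none =
      (l.find? (fun c => decide (m = some c.2.1))).map (fun c => [c.1, c.2.1, c.2.2]) := by
  induction l with
  | nil => rfl
  | cons c t ih =>
    by_cases h : m = some c.2.1
    · simp [pvStepA, h, pvStepA_some]
    · simp [pvStepA, h, ih]

theorem pvFoldl_min_le (l : List (Int × Int × Int)) (a : Int) :
    l.foldl (fun x c => min x c.2.1) a ≤ a := by
  induction l generalizing a with
  | nil => simp
  | cons c t ih => exact le_trans (ih _) (min_le_left _ _)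

-- B's strict-< running fold finds the FIRST element attaining the minimum value
theorem pvFoldB_eq_find (l : List (Int × Int × Int)) (b : Int × Int × Int) :
    l.foldl pvStepB (some b) =
      (b :: l).find? (fun c => decide (c.2.1 = l.foldl (fun x c => min x c.2.1) b.2.1)) := by
  induction l generalizing b with
  | nil => simp
  | cons c t ih =>
    have hstep : pvStepB (some b) c = some (if c.2.1 < b.2.1 then c else b) := by
      by_cases h : c.2.1 < b.2.1 <;> simp [pvStepB, h]
    set b' : Int × Int × Int := if c.2.1 < b.2.1 then c else b with hb'
    have hval : b'.2.1 = min b.2.1 c.2.1 := by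
      by_cases h : c.2.1 < b.2.1 <;> simp [hb', h] <;> omega
    have hM : t.foldl (fun x c => min x c.2.1) b'.2.1
        = (c :: t).foldl (fun x c => min x c.2.1) b.2.1 := by
      simp [hval, List.foldl_cons]
    have hMle : t.foldl (fun x c => min x c.2.1) b'.2.1 ≤ min b.2.1 c.2.1 := by
      have := pvFoldl_min_le t b'.2.1
      omega
    have lhs : (c :: t).foldl pvStepB (some b)
        = (b' :: t).find? (fun d => decide (d.2.1 = t.foldl (fun x c => min x c.2.1) b'.2.1)) := by
      rw [List.foldl_cons, hstep, ih b']
    rw [lhs, ← hM]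
    set M := t.foldl (fun x c => min x c.2.1) b'.2.1 with hMdef
    by_cases h : c.2.1 < b.2.1
    · have hbne : ¬ (b.2.1 = M) := by omega
      rw [hb', if_pos h]
      simp [List.find?_cons, hbne]
    · by_cases hbeq : b.2.1 = M
      · rw [hb', if_neg h]
        simp [hbeq]
      · have hcne : ¬ (c.2.1 = M) := by
          simp at h; omega
        rw [hb', if_neg h]
        simp [hbeq, hcne]

-- the running minimum is attained by some element of b :: l
theorem pvMinAttained (l : List (Int × Int × Int)) (b : Int × Int × Int) :
    ∃ d ∈ b :: l, d.2.1 = l.foldl (fun x c => min x c.2.1) b.2.1 := by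
  induction l generalizing b with
  | nil => exact ⟨b, by simp⟩
  | cons c t ih =>
    set b' : Int × Int × Int := if c.2.1 < b.2.1 then c else b with hb'
    have hval : b'.2.1 = min b.2.1 c.2.1 := by
      by_cases h : c.2.1 < b.2.1 <;> simp [hb', h] <;> omega
    obtain ⟨d, hdmem, hdval⟩ := ih b'
    refine ⟨d, ?_, ?_⟩
    · rcases List.mem_cons.mp hdmem with h | h
      · by_cases hlt : c.2.1 < b.2.1
        · rw [hb', if_pos hlt] at h; simp [h]
        · rw [hb', if_neg hlt] at h; simp [h]
      · simp [h]
    · rw [hdval, List.foldl_cons, ← hval]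

-- Port A over pvCells.
theorem pvA_cells (matriz : List (List Int)) :
    melhor_volta matriz =
      (((pvCells matriz).find? (fun c =>
          decide (PySem.List.min? ((pvCells matriz).map (fun c => c.2.1)) (fun y => y) = some c.2.1))).map
        (fun c => [c.1, c.2.1, c.2.2])).getD [] := by
  have htodos :
      (PySem.List.pyRange 0 (matriz.length : Int) 1).foldl (fun acc i =>
        (PySem.List.pyRange 0 ((PySem.List.pyGetD matriz 0 []).length : Int) 1).foldl
          (fun acc j => acc ++ [(pvCell matriz i j).2.1]) acc) ([] : List Int)
      = (pvCells matriz).map (fun c => c.2.1) := by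
    rw [pvNested matriz (fun acc c => acc ++ [c.2.1]) ([] : List Int),
      PySem.List.foldl_append_singleton_eq_map]
    simp
  calc
    melhor_volta matriz
        = ((PySem.List.pyRange 0 (matriz.length : Int) 1).foldl (fun acc i =>
            (PySem.List.pyRange 0 ((PySem.List.pyGetD matriz 0 []).length : Int) 1).foldl
              (fun acc j =>
                pvStepA (PySem.List.min?
                  ((PySem.List.pyRange 0 (matriz.length : Int) 1).foldl (fun acc i =>
                    (PySem.List.pyRange 0 ((PySem.List.pyGetD matriz 0 []).length : Int) 1).foldl
                      (fun acc j => acc ++ [(pvCell matriz i j).2.1]) acc) ([] : List Int))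
                  (fun y => y)) acc (pvCell matriz i j)) acc) none).getD [] := rfl
    _ = ((PySem.List.pyRange 0 (matriz.length : Int) 1).foldl (fun acc i =>
            (PySem.List.pyRange 0 ((PySem.List.pyGetD matriz 0 []).length : Int) 1).foldl
              (fun acc j =>
                pvStepA (PySem.List.min? ((pvCells matriz).map (fun c => c.2.1)) (fun y => y))
                  acc (pvCell matriz i j)) acc) none).getD [] := by
          simp only [htodos]
    _ = (((pvCells matriz).foldl
            (pvStepA (PySem.List.min? ((pvCells matriz).map (fun c => c.2.1)) (fun y => y)))
            none)).getD [] := by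
          rw [pvNested]
    _ = _ := by rw [pvFoldA_eq_find]

-- Port B over pvCells.
theorem pvB_cells (matriz : List (List Int)) (h : matriz ≠ []) :
    melhor_volta_alt matriz =
      (match (pvCells matriz).foldl pvStepB none with
       | some b => [b.1, b.2.1, b.2.2]
       | none => []) := by
  calc
    melhor_volta_alt matriz
        = if matriz = [] then []
          else (match (PySem.List.pyRange 0 (matriz.length : Int) 1).foldl (fun best i =>
              (PySem.List.pyRange 0 ((PySem.List.pyGetD matriz 0 []).length : Int) 1).foldl
                (fun best j => pvStepB best (pvCell matriz i j)) best) none with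
            | some b => [b.1, b.2.1, b.2.2]
            | none => []) := rfl
    _ = _ := by rw [if_neg h, pvNested]

theorem pvMain (matriz : List (List Int)) : melhor_volta matriz = melhor_volta_alt matriz := by
  by_cases hE : matriz = []
  · subst hE; rfl
  · rw [pvA_cells, pvB_cells matriz hE]
    rcases hc : pvCells matriz with _ | ⟨c, t⟩
    · simp
    · have hmin : PySem.List.min? (c.2.1 :: t.map (fun c => c.2.1)) (fun y => y)
          = some (t.foldl (fun x c => min x c.2.1) c.2.1) := by
        rw [PySem.List.min?_id_cons, List.foldl_map]
      set M := t.foldl (fun x c => min x c.2.1) c.2.1 with hMdef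
      have hfold : (c :: t).foldl pvStepB none
          = (c :: t).find? (fun d => decide (d.2.1 = M)) := by
        rw [List.foldl_cons, show pvStepB none c = some c from rfl, pvFoldB_eq_find]
      have hpred : (fun d : Int × Int × Int =>
            decide (PySem.List.min? ((c :: t).map (fun c => c.2.1)) (fun y => y) = some d.2.1))
          = (fun d : Int × Int × Int => decide (d.2.1 = M)) := by
        funext d
        rw [List.map_cons, hmin]
        by_cases hd : d.2.1 = M
        · simp [hd]
        · have hd2 : ¬ M = d.2.1 := fun h => hd h.symm
          simp [hd, hd2]
      obtain ⟨d, hdmem, hdval⟩ := pvMinAttained t c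
      have hsome : ∃ e, (c :: t).find? (fun d => decide (d.2.1 = M)) = some e := by
        have : ((c :: t).find? (fun d => decide (d.2.1 = M))).isSome := by
          rw [List.find?_isSome]
          exact ⟨d, hdmem, by simpa using hdval⟩
        exact Option.isSome_iff_exists.mp this
      obtain ⟨e, he⟩ := hsome
      rw [hpred, hfold, he]
      rfl

-- ===== VERDICT (by name: the statement is the Claim_ definition above) =====
theorem melhor_volta_spec : Claim_equal_melhor_volta := by
  intro matriz _ _
  exact pvMain matriz
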